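-- pv_equiv track=rewrite | github.com/europeana/search | entity_collection/munge/mongo_import/entities/ContextClassHarvesters.py | shingle_preflabels
-- ===== SOURCE A (Python) =====
-- def shingle_preflabels(preflabels):
--     shingled_labels = []
--     for label in preflabels:
--         all_terms = label.split()
--         for i in range(len(all_terms)):
--             shingle = " ".join(all_terms[i:len(all_terms)])
--             shingled_labels.append(shingle)
--     return shingled_labels
-- ===== SOURCE B (Python) =====
-- def shingle_preflabels(preflabels):
--     shingled_labels = []
--     for label in preflabels:
--         suffixes = []
--         acc = ""
--         for w in reversed(label.split()):
--             acc = w if not suffixes else w + " " + acc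
--             suffixes.append(acc)
--         shingled_labels.extend(reversed(suffixes))
--     return shingled_labels
-- ===== Notes on version B (the rewrite author's own statement) =====
-- stated objective: alternative
-- what changed: B builds each label's suffix shingles in one backward pass, extending an accumulator string by one word at a time instead of re-slicing and re-joining the word list for every index.
import Mathlib
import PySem

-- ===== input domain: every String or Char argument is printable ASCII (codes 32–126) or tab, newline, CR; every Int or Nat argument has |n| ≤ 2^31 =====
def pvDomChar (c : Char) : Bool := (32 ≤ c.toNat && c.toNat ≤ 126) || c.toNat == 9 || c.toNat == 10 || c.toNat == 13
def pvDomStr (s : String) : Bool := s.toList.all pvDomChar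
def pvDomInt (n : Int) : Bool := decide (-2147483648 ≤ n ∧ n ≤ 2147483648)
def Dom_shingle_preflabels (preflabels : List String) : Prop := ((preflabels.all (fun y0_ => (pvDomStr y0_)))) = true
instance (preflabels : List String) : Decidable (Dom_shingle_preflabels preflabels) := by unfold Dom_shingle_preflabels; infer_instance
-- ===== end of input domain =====

-- B replaces A's per-index re-slice-and-join with one backward pass per label that grows
-- each suffix from the previous one (objective: alternative decomposition of the same task).

-- ===== PORT A =====
def shingle_preflabels (preflabels : List String) : List String :=
  preflabels.foldl (fun shingled_labels label =>
    let all_terms := PySem.Str.split₀ label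
    (PySem.List.pyRange 0 (all_terms.length : Int) 1).foldl
      (fun acc i =>
        acc ++ [PySem.Str.join " " (PySem.List.slice all_terms (some i) (some (all_terms.length : Int)))])
      shingled_labels) []

-- ===== PORT B =====
-- Python's 'w + " " + acc' on strings is concatenation of code points; ported exactly via toList/String.mk.
def pvAltStep (st : String × List String) (w : String) : String × List String :=
  let acc := if st.2.isEmpty then w else String.ofList (w.toList ++ ' ' :: st.1.toList)
  (acc, st.2 ++ [acc])

def shingle_preflabels_alt (preflabels : List String) : List String :=
  preflabels.foldl (fun shingled_labels label =>
    let st := (PySem.Str.split₀ label).reverse.foldl pvAltStep ("", [])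
    shingled_labels ++ st.2.reverse) []

-- ===== PRECONDITION & SPEC =====
def Spec_shingle_preflabels (preflabels : List String) (out : List String) : Prop := out = shingle_preflabels_alt preflabels
instance (preflabels : List String) (out : List String) : Decidable (Spec_shingle_preflabels preflabels out) := by unfold Spec_shingle_preflabels; infer_instance

-- ===== CLAIM (what is proved, stated in full; the proofs are below) =====
def Claim_equal_shingle_preflabels : Prop := ∀ (preflabels : List String), Dom_shingle_preflabels preflabels → Spec_shingle_preflabels preflabels (shingle_preflabels preflabels)

-- ===== LEMMAS AND PROOFS =====

-- the mathematical object both ports compute per label: all suffix joins, longest first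
def pvShing (ts : List String) : List String :=
  (List.range ts.length).map (fun k => PySem.Str.join " " (ts.drop k))

theorem pvShing_cons (w : String) (ts : List String) :
    pvShing (w :: ts) = PySem.Str.join " " (w :: ts) :: pvShing ts := by
  simp [pvShing, List.range_succ_eq_map, List.map_map, Function.comp]

-- prepending a word to a nonempty join is one concatenation (Python's w + " " + acc)
theorem pvJoin_cons (w v : String) (ts : List String) :
    PySem.Str.join " " (w :: v :: ts)
      = String.ofList (w.toList ++ ' ' :: (PySem.Str.join " " (v :: ts)).toList) := by
  have h : (PySem.Str.join " " (w :: v :: ts)).toList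
      = w.toList ++ ' ' :: (PySem.Str.join " " (v :: ts)).toList := by
    simp [PySem.Str.toList_join, PySem.Chars.join_cons_cons]
  calc PySem.Str.join " " (w :: v :: ts)
      = String.ofList (PySem.Str.join " " (w :: v :: ts)).toList := (String.ofList_toList).symm
    _ = _ := by rw [h]

-- A's inner loop over range(len) appends exactly pvShing ts
theorem pvA_inner (ts : List String) (acc0 : List String) :
    (PySem.List.pyRange 0 (ts.length : Int) 1).foldl
      (fun acc i =>
        acc ++ [PySem.Str.join " " (PySem.List.slice ts (some i) (some (ts.length : Int)))])
      acc0 = acc0 ++ pvShing ts := by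
  rw [PySem.List.pyRange_one]
  rw [List.foldl_map, PySem.List.foldl_append_singleton_eq_map]
  have hn : (((ts.length : Int)) - 0).toNat = ts.length := by omega
  rw [hn]
  unfold pvShing
  congr 1
  apply List.map_congr_left
  intro k hk
  simp only [List.mem_range] at hk
  have h0 : ((0:Int) + (k : Nat)) = ((k : Nat) : Int) := by omega
  rw [h0, PySem.List.slice_natCast ts k ts.length, List.take_of_length_le (by simp)]

-- B's backward pass: the accumulator pair after consuming the words of ts in reverse
theorem pvB_inner (ts : List String) :
    ts.reverse.foldl pvAltStep ("", []) =
      ((if ts.isEmpty then "" else PySem.Str.join " " ts), (pvShing ts).reverse) := by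
  induction ts with
  | nil => simp [pvShing]
  | cons w ts ih =>
    rw [List.reverse_cons, List.foldl_append, ih]
    cases ts with
    | nil =>
      simp [pvAltStep, pvShing, PySem.Str.join]
    | cons v ts' =>
      simp only [List.foldl_cons, List.foldl_nil, pvAltStep, List.isEmpty_cons,
        if_neg Bool.false_ne_true, pvShing_cons]
      have hne : ((PySem.Str.join " " (v :: ts') :: pvShing ts').reverse).isEmpty = false := by
        simp
      rw [hne]
      simp [pvJoin_cons]

-- the two per-label loop bodies agree, hence the outer folds agree
theorem pvFold_eq (ls : List String) (acc : List String) :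
    ls.foldl (fun shingled_labels label =>
      let all_terms := PySem.Str.split₀ label
      (PySem.List.pyRange 0 (all_terms.length : Int) 1).foldl
        (fun acc i =>
          acc ++ [PySem.Str.join " " (PySem.List.slice all_terms (some i) (some (all_terms.length : Int)))])
        shingled_labels) acc
    = ls.foldl (fun shingled_labels label =>
      let st := (PySem.Str.split₀ label).reverse.foldl pvAltStep ("", [])
      shingled_labels ++ st.2.reverse) acc := by
  induction ls generalizing acc with
  | nil => rfl
  | cons x ls ih =>
    rw [List.foldl_cons, List.foldl_cons, ih]
    congr 1
    show (PySem.List.pyRange 0 ((PySem.Str.split₀ x).length : Int) 1).foldl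
        (fun a i => a ++ [PySem.Str.join " " (PySem.List.slice (PySem.Str.split₀ x) (some i)
          (some ((PySem.Str.split₀ x).length : Int)))]) acc
      = acc ++ ((PySem.Str.split₀ x).reverse.foldl pvAltStep ("", [])).2.reverse
    rw [pvA_inner, pvB_inner]
    simp

-- ===== VERDICT (by name: the statement is the Claim_ definition above) =====
theorem shingle_preflabels_spec : Claim_equal_shingle_preflabels := by
  intro preflabels _
  unfold Spec_shingle_preflabels shingle_preflabels shingle_preflabels_alt
  exact pvFold_eq preflabels []
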